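-- pv_equiv track=rewrite | github.com/mhrnz/entnet_bAbI_reproduction | data preprocessing.py | tokenize_stories
-- ===== SOURCE A (Python) =====
-- def tokenize_stories(parsed_data,token_to_id):
--     story_ids=[]
--     max_sent_num=0
--     max_sent_len=0
--     for context, query, answer in parsed_data:
--         if len(context)>max_sent_num:
--           max_sent_num=len(context)
--         for sentence in context:
--           if len(sentence)>max_sent_len:
--             max_sent_len=len(sentence)
--         context = [[token_to_id[token] for token in sentence] for sentence in context]
--         query = [token_to_id[token] for token in query]
--         if len(query)>max_sent_len:
--           max_sent_len=len(query)
--         answer = token_to_id[answer]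
--         story_ids.append((context[max(0,len(context)-130):], query, answer))
--     return story_ids, max_sent_num, max_sent_len
-- ===== SOURCE B (Python) =====
-- def tokenize_stories(parsed_data, token_to_id):
--     # Divide-and-conquer: split the story list in half, solve each half,
--     # merge results (concatenate story ids, take componentwise maxima).
--     def solve(pd):
--         if not pd:
--             return [], 0, 0
--         if len(pd) == 1:
--             c, q, a = pd[0]
--             story = ([[token_to_id[t] for t in s] for s in c[max(0, len(c) - 130):]],
--                      [token_to_id[t] for t in q],
--                      token_to_id[a])
--             return [story], len(c), max([len(s) for s in c] + [len(q)])
--         mid = len(pd) // 2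
--         l_ids, l_num, l_len = solve(pd[:mid])
--         r_ids, r_num, r_len = solve(pd[mid:])
--         return l_ids + r_ids, max(l_num, r_num), max(l_len, r_len)
--     return solve(parsed_data)
-- ===== Notes on version B (the rewrite author's own statement) =====
-- stated objective: alternative
-- what changed: Replaces A's single forward loop with running-max accumulators by a divide-and-conquer recursion: split the story list in half, solve each half independently, and merge by concatenating story ids and taking componentwise maxima (context is truncated to its last 130 sentences before tokenizing instead of after).
import Mathlib
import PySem

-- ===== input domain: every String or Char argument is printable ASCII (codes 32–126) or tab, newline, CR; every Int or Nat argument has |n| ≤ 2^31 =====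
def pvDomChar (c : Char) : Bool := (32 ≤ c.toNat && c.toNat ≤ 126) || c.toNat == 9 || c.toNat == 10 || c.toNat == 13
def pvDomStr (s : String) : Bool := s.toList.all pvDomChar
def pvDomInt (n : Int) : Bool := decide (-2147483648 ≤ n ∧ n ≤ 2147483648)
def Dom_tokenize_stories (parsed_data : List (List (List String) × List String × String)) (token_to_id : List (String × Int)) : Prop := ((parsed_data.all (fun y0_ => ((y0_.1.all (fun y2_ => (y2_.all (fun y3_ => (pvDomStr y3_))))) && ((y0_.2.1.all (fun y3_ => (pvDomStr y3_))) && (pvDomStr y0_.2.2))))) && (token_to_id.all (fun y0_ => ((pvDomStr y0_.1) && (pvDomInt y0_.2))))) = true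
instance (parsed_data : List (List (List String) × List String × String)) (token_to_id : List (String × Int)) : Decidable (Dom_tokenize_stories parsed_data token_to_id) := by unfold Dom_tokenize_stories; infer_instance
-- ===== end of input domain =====

-- B replaces A's single forward loop with running maxima by a divide-and-conquer recursion
-- (split in half, solve halves, concatenate ids and take componentwise maxima); same cost.

-- ===== PORT A =====
-- token_to_id[t] is Dict.get?; `.getD 0` is reached only where Python raises KeyError — those inputs are excluded by Pre_.
def tokenize_stories (parsed_data : List (List (List String) × List String × String)) (token_to_id : List (String × Int)) : (List (List (List Int) × List Int × Int)) × Int × Int :=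
  parsed_data.foldl
    (fun st item =>
      let context := item.1
      let query := item.2.1
      let answer := item.2.2
      let max_sent_num := if (context.length : Int) > st.2.1 then (context.length : Int) else st.2.1
      let max_sent_len := context.foldl (fun m sentence => if (sentence.length : Int) > m then (sentence.length : Int) else m) st.2.2
      let contextIds := context.map (fun sentence => sentence.map (fun token => ((PySem.Dict.mk token_to_id).get? token).getD 0))
      let queryIds := query.map (fun token => ((PySem.Dict.mk token_to_id).get? token).getD 0)
      let max_sent_len := if (queryIds.length : Int) > max_sent_len then (queryIds.length : Int) else max_sent_len
      let answerId := ((PySem.Dict.mk token_to_id).get? answer).getD 0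
      (st.1 ++ [(PySem.List.slice contextIds (some (max 0 ((contextIds.length : Int) - 130))) none, queryIds, answerId)], max_sent_num, max_sent_len))
    ([], 0, 0)

-- ===== PORT B =====
-- divide-and-conquer helper `solve` of Source B; pd[:mid] / pd[mid:] are PySem slices,
-- len(pd)//2 on a nonnegative length is Nat division, max() of a nonempty list is maxD (default unreached).
def solveB (token_to_id : List (String × Int)) (pd : List (List (List String) × List String × String)) : (List (List (List Int) × List Int × Int)) × Int × Int :=
  match pd with
  | [] => ([], 0, 0)
  | [it] =>
    let c := it.1
    let q := it.2.1
    let a := it.2.2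
    let story := ((PySem.List.slice c (some (max 0 ((c.length : Int) - 130))) none).map
                    (fun s => s.map (fun t => ((PySem.Dict.mk token_to_id).get? t).getD 0)),
                  q.map (fun t => ((PySem.Dict.mk token_to_id).get? t).getD 0),
                  ((PySem.Dict.mk token_to_id).get? a).getD 0)
    ([story], (c.length : Int),
     PySem.List.maxD (c.map (fun s => (s.length : Int)) ++ [(q.length : Int)]) (fun y => y) 0)
  | x :: y :: rest =>
    let mid := (x :: y :: rest).length / 2
    let L := solveB token_to_id (PySem.List.slice (x :: y :: rest) none (some (mid : Int)))
    let R := solveB token_to_id (PySem.List.slice (x :: y :: rest) (some (mid : Int)) none)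
    (L.1 ++ R.1, max L.2.1 R.2.1, max L.2.2 R.2.2)
termination_by pd.length
decreasing_by
  · simp only [PySem.List.slice_to_natCast, List.length_take, List.length_cons]; omega
  · simp only [PySem.List.slice_from_natCast, List.length_drop, List.length_cons]; omega

def tokenize_stories_alt (parsed_data : List (List (List String) × List String × String)) (token_to_id : List (String × Int)) : (List (List (List Int) × List Int × Int)) × Int × Int :=
  solveB token_to_id parsed_data

-- ===== PRECONDITION & SPEC =====
-- Pre_ excludes exactly the inputs where Python A raises KeyError: some context/query token or answer missing from token_to_id.
def Pre_tokenize_stories (parsed_data : List (List (List String) × List String × String)) (token_to_id : List (String × Int)) : Prop :=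
  (parsed_data.all (fun it =>
    it.1.all (fun s => s.all (fun t => (PySem.Dict.mk token_to_id).contains t))
    && it.2.1.all (fun t => (PySem.Dict.mk token_to_id).contains t)
    && (PySem.Dict.mk token_to_id).contains it.2.2)) = true
instance (parsed_data : List (List (List String) × List String × String)) (token_to_id : List (String × Int)) : Decidable (Pre_tokenize_stories parsed_data token_to_id) := by unfold Pre_tokenize_stories; infer_instance

def pvWitness_tokenize_stories : (List (List (List String) × List String × String)) × (List (String × Int)) :=
  ([([["mary", "went"], ["john", "ran"]], ["where", "is", "mary"], "went")],
   [("mary", 1), ("went", 2), ("john", 3), ("ran", 4), ("where", 5), ("is", 6)])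

def Spec_tokenize_stories (parsed_data : List (List (List String) × List String × String)) (token_to_id : List (String × Int)) (out : (List (List (List Int) × List Int × Int)) × Int × Int) : Prop := out = tokenize_stories_alt parsed_data token_to_id
instance (parsed_data : List (List (List String) × List String × String)) (token_to_id : List (String × Int)) (out : (List (List (List Int) × List Int × Int)) × Int × Int) : Decidable (Spec_tokenize_stories parsed_data token_to_id out) := by unfold Spec_tokenize_stories; infer_instance

-- ===== CLAIM (what is proved, stated in full; the proofs are below) =====
def Claim_equal_tokenize_stories : Prop := ∀ (parsed_data : List (List (List String) × List String × String)) (token_to_id : List (String × Int)), Dom_tokenize_stories parsed_data token_to_id → Pre_tokenize_stories parsed_data token_to_id → Spec_tokenize_stories parsed_data token_to_id (tokenize_stories parsed_data token_to_id)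

-- ===== LEMMAS AND PROOFS =====

-- canonical form both programs are reduced to: (mapped stories, max story length, max sentence/query length)
def pvStory (token_to_id : List (String × Int)) (it : List (List String) × List String × String) : List (List Int) × List Int × Int :=
  ((PySem.List.slice it.1 (some (max 0 ((it.1.length : Int) - 130))) none).map
      (fun s => s.map (fun t => ((PySem.Dict.mk token_to_id).get? t).getD 0)),
   it.2.1.map (fun t => ((PySem.Dict.mk token_to_id).get? t).getD 0),
   ((PySem.Dict.mk token_to_id).get? it.2.2).getD 0)

def pvS (it : List (List String) × List String × String) : List Int := it.1.map (fun s => (s.length : Int))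
def pvQ (it : List (List String) × List String × String) : Int := (it.2.1.length : Int)

def pvCanon (token_to_id : List (String × Int)) (pd : List (List (List String) × List String × String)) : (List (List (List Int) × List Int × Int)) × Int × Int :=
  (pd.map (pvStory token_to_id),
   (pd.map (fun it => (it.1.length : Int))).foldl max 0,
   (pd.flatMap pvS ++ pd.map pvQ).foldl max 0)

-- a fold over a triple of independent accumulators is three folds
theorem pv_split3 {β σ₁ σ₂ σ₃ : Type} (f : σ₁ → β → σ₁) (g : σ₂ → β → σ₂) (h : σ₃ → β → σ₃) (l : List β) (a : σ₁) (b : σ₂) (c : σ₃) :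
    l.foldl (fun s e => (f s.1 e, g s.2.1 e, h s.2.2 e)) (a, b, c) = (l.foldl f a, l.foldl g b, l.foldl h c) := by
  induction l generalizing a b c with
  | nil => rfl
  | cons x t ih => simp only [List.foldl_cons, ih]

-- Python's 'if x > m: m = x' step is a max.
theorem pv_if_max (m x : Int) : (if x > m then x else m) = max m x := by
  rw [max_def]; split_ifs <;> omega

-- pull a max out of a running max
theorem pv_foldl_max_pull (l : List Int) (u v : Int) :
    l.foldl max (max u v) = max u (l.foldl max v) := by
  induction l generalizing v with
  | nil => simp
  | cons h t ih => simp only [List.foldl_cons, max_assoc, ih]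

theorem pv_foldl_max_le (l : List Int) (m : Int) : m ≤ l.foldl max m := by
  induction l generalizing m with
  | nil => simp
  | cons h t ih => exact le_trans (le_max_left m h) (ih _)

-- max-fold from 0 splits over append
theorem pv_maxfold_append (a b : List Int) :
    (a ++ b).foldl max 0 = max (a.foldl max 0) (b.foldl max 0) := by
  rw [List.foldl_append]
  have h0 : (0 : Int) ≤ a.foldl max 0 := pv_foldl_max_le a 0
  calc b.foldl max (a.foldl max 0) = b.foldl max (max (a.foldl max 0) 0) := by
        rw [max_eq_left h0]
    _ = max (a.foldl max 0) (b.foldl max 0) := pv_foldl_max_pull b _ 0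

-- max(xs, default irrelevant) over a list of nonnegative Ints is the running-max loop from 0
theorem pv_maxD_id_nonneg (l : List Int) (h : ∀ x ∈ l, 0 ≤ x) :
    PySem.List.maxD l (fun y => y) 0 = l.foldl max 0 := by
  cases l with
  | nil => rfl
  | cons x t =>
    have hx : max 0 x = x := by
      have := h x (by simp); omega
    simp [PySem.List.maxD, PySem.List.max?_id_cons, hx]

-- A's interleaved sentence/query maximum equals one max over all sentence lengths then all query lengths
theorem pv_foldl_max_pull_r (l : List Int) (a q : Int) :
    l.foldl max (max a q) = max (l.foldl max a) q := by
  induction l generalizing a with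
  | nil => simp
  | cons h t ih => simp only [List.foldl_cons, max_right_comm a q h, ih]

theorem pv_msl_split {α : Type} (S : α → List Int) (Q : α → Int) (pd : List α) (m : Int) :
    pd.foldl (fun m it => max ((S it).foldl max m) (Q it)) m
      = ((pd.flatMap S) ++ pd.map Q).foldl max m := by
  induction pd generalizing m with
  | nil => simp
  | cons it rest ih =>
    simp only [List.foldl_cons, List.flatMap_cons, List.map_cons, List.append_assoc,
      List.foldl_append, ih]
    rw [pv_foldl_max_pull_r (rest.flatMap S) (List.foldl max m (S it)) (Q it)]

-- the canonical form distributes over append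
theorem pv_canon_append (t2i : List (String × Int)) (l r : List (List (List String) × List String × String)) :
    pvCanon t2i (l ++ r)
      = ((pvCanon t2i l).1 ++ (pvCanon t2i r).1,
         max (pvCanon t2i l).2.1 (pvCanon t2i r).2.1,
         max (pvCanon t2i l).2.2 (pvCanon t2i r).2.2) := by
  unfold pvCanon
  simp only [List.map_append, List.flatMap_append]
  refine Prod.ext rfl (Prod.ext ?_ ?_)
  · exact pv_maxfold_append _ _
  · show ((l.flatMap pvS ++ r.flatMap pvS) ++ (l.map pvQ ++ r.map pvQ)).foldl max 0
        = max ((l.flatMap pvS ++ l.map pvQ).foldl max 0) ((r.flatMap pvS ++ r.map pvQ).foldl max 0)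
    simp only [pv_maxfold_append, List.append_assoc]
    omega

-- B's divide-and-conquer computes the canonical form
theorem pv_solveB_eq (t2i : List (String × Int)) :
    ∀ (n : Nat) (pd : List (List (List String) × List String × String)), pd.length ≤ n →
      solveB t2i pd = pvCanon t2i pd := by
  intro n
  induction n with
  | zero =>
    intro pd h
    have : pd = [] := List.eq_nil_of_length_eq_zero (Nat.le_zero.mp h)
    subst this; rw [solveB]; rfl
  | succ n ih =>
    intro pd h
    match pd with
    | [] => rw [solveB]; rfl
    | [it] =>
      rw [solveB]
      unfold pvCanon
      refine Prod.ext rfl (Prod.ext ?_ ?_)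
      · show (it.1.length : Int) = [( it.1.length : Int)].foldl max 0
        simp
      · show PySem.List.maxD (it.1.map (fun s => (s.length : Int)) ++ [(it.2.1.length : Int)]) (fun y => y) 0
            = ([it].flatMap pvS ++ [it].map pvQ).foldl max 0
        rw [pv_maxD_id_nonneg]
        · simp [pvS, pvQ]
        · intro x hx
          simp only [List.mem_append, List.mem_map, List.mem_singleton] at hx
          rcases hx with ⟨a, -, rfl⟩ | rfl <;> positivity
    | x :: y :: rest =>
      rw [solveB]
      have hlen : (x :: y :: rest).length ≤ n + 1 := h
      set pd2 := x :: y :: rest with hpd2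
      have hmid : (pd2.length / 2) ≤ pd2.length := Nat.div_le_self _ _
      rw [PySem.List.slice_to_natCast, PySem.List.slice_from_natCast]
      have h1 : (pd2.take (pd2.length / 2)).length ≤ n := by
        simp only [List.length_take]
        simp only [hpd2, List.length_cons] at *
        omega
      have h2 : (pd2.drop (pd2.length / 2)).length ≤ n := by
        simp only [List.length_drop]
        simp only [hpd2, List.length_cons] at *
        omega
      rw [ih _ h1, ih _ h2, ← pv_canon_append, List.take_append_drop]

-- ===== VERDICT (by name: the statement is the Claim_ definition above) =====
theorem tokenize_stories_spec : Claim_equal_tokenize_stories := by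
  intro pd t2i _ _
  unfold Spec_tokenize_stories
  rw [show tokenize_stories_alt pd t2i = pvCanon t2i pd from
    pv_solveB_eq t2i pd.length pd le_rfl]
  unfold tokenize_stories pvCanon
  rw [pv_split3
    (f := fun (acc : List (List (List Int) × List Int × Int)) (item : List (List String) × List String × String) =>
      acc ++ [(PySem.List.slice (item.1.map (fun sentence => sentence.map (fun token => ((PySem.Dict.mk t2i).get? token).getD 0))) (some (max 0 (((item.1.map (fun sentence => sentence.map (fun token => ((PySem.Dict.mk t2i).get? token).getD 0))).length : Int) - 130))) none,
        item.2.1.map (fun token => ((PySem.Dict.mk t2i).get? token).getD 0),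
        ((PySem.Dict.mk t2i).get? item.2.2).getD 0)])
    (g := fun (m : Int) (item : List (List String) × List String × String) =>
      if (item.1.length : Int) > m then (item.1.length : Int) else m)
    (h := fun (m : Int) (item : List (List String) × List String × String) =>
      if ((item.2.1.map (fun token => ((PySem.Dict.mk t2i).get? token).getD 0)).length : Int) > (item.1.foldl (fun m sentence => if (sentence.length : Int) > m then (sentence.length : Int) else m) m) then ((item.2.1.map (fun token => ((PySem.Dict.mk t2i).get? token).getD 0)).length : Int) else (item.1.foldl (fun m sentence => if (sentence.length : Int) > m then (sentence.length : Int) else m) m))]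
  rw [Prod.ext_iff, Prod.ext_iff]
  refine ⟨?_, ?_, ?_⟩
  · -- story_ids
    rw [PySem.List.foldl_append_singleton_eq_map, List.nil_append]
    refine List.map_congr_left (fun item _ => ?_)
    unfold pvStory
    have hmax : max 0 ((item.1.length : Int) - 130) = ((item.1.length - 130 : Nat) : Int) := by omega
    simp only [List.length_map, hmax, PySem.List.slice_from_natCast, List.map_drop]
  · -- max_sent_num
    rw [List.foldl_map]
    simp only [pv_if_max]
  · -- max_sent_len
    have key := pv_msl_split (S := pvS) (Q := pvQ) pd 0
    simp only [pvS, pvQ, List.foldl_map] at key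
    simp only [pv_if_max, List.length_map]
    exact key
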